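-- pv_equiv track=rewrite | github.com/LearnerShape/lsgraph | lsengine/pathway_service.py | schedule_weekly_course
-- ===== SOURCE A (Python) =====
-- def schedule_weekly_course(duration, weekly_effort, weekly_slots,
--                            max_hours_per_week, earliest_start=0):
--     for i in range(earliest_start,len(weekly_slots)-duration+1):
--         fits = True
--         for j in range(duration):
--             if (len(weekly_slots[i+j]) + weekly_effort) > max_hours_per_week:
--                 fits = False
--         if fits:
--             return i
--     return None
-- ===== SOURCE B (Python) =====
-- def schedule_weekly_course(duration, weekly_effort, weekly_slots,
--                            max_hours_per_week, earliest_start=0):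
--     n = len(weekly_slots)
--     hi = n - duration  # last admissible start week
--     if earliest_start > hi:
--         return None
--     if duration <= 0:
--         return earliest_start
--     # sliding window: bad = number of weeks in [i, i+duration) that do not fit
--     bad = 0
--     for j in range(duration):
--         if len(weekly_slots[earliest_start + j]) + weekly_effort > max_hours_per_week:
--             bad += 1
--     i = earliest_start
--     while bad > 0:
--         if i == hi:
--             return None
--         if len(weekly_slots[i]) + weekly_effort > max_hours_per_week:
--             bad -= 1
--         i += 1
--         if len(weekly_slots[i + duration - 1]) + weekly_effort > max_hours_per_week:
--             bad += 1
--     return i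
-- ===== Notes on version B (the rewrite author's own statement) =====
-- stated objective: alternative
-- what changed: B replaces A's re-scan of every duration-length window by a single sliding window that maintains the count of non-fitting weeks and updates it incrementally per candidate start.
import Mathlib
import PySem

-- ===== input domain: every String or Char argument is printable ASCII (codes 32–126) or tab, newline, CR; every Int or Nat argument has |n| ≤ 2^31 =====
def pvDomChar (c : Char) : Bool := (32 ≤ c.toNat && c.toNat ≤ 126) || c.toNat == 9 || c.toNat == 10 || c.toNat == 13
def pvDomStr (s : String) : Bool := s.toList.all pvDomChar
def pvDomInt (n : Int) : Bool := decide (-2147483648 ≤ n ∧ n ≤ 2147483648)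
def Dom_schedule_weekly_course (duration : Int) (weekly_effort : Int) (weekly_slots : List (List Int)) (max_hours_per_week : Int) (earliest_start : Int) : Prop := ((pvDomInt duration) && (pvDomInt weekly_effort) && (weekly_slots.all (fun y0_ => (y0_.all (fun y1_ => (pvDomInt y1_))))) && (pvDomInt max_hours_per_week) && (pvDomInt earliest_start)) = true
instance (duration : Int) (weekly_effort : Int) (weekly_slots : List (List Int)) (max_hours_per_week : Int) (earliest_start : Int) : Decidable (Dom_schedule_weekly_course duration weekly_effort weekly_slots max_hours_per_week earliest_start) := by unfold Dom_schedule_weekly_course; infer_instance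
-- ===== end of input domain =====

-- B replaces A's per-candidate re-scan of the whole duration-length window by a sliding window
-- maintaining the count of non-fitting weeks, updated incrementally (objective: alternative).

-- ===== PORT A =====
-- len(weekly_slots[k]) via Python indexing (negative wraps, out of range raises — excluded by Pre_)
def swcLen (ws : List (List Int)) (k : Int) : Int :=
  (((PySem.List.pyGet? ws k).getD []).length : Int)

-- inner loop: 'fits = True; for j in range(duration): if … : fits = False'
def swcFits (ws : List (List Int)) (we mh i : Int) (js : List Int) : Bool :=
  js.foldl (fun fits j => if swcLen ws (i + j) + we > mh then false else fits) true

-- outer loop 'for i in range(earliest_start, len(weekly_slots)-duration+1)' (range iterated lazily, as in Python)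
def swcLoopA (ws : List (List Int)) (we mh dur stop : Int) (i : Int) : Option Int :=
  if _h : i < stop then
    if swcFits ws we mh i (PySem.List.pyRange 0 dur 1) then some i
    else swcLoopA ws we mh dur stop (i + 1)
  else none
termination_by (stop - i).toNat
decreasing_by omega

def schedule_weekly_course (duration : Int) (weekly_effort : Int) (weekly_slots : List (List Int)) (max_hours_per_week : Int) (earliest_start : Int) : Option Int :=
  swcLoopA weekly_slots weekly_effort max_hours_per_week duration
    ((weekly_slots.length : Int) - duration + 1) earliest_start

-- ===== PORT B =====
def swcBad (ws : List (List Int)) (we mh k : Int) : Bool :=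
  swcLen ws k + we > mh

-- the while loop; fuel = hi - i bounds the iteration count (the 0 case is unreachable: i = hi is tested first)
def swcLoopB (ws : List (List Int)) (we mh dur hi : Int) : Nat → Int → Int → Option Int
  | fuel, i, bad =>
      if bad > 0 then
        if i == hi then none
        else
          match fuel with
          | 0 => none
          | fuel + 1 =>
              let bad1 := if swcBad ws we mh i then bad - 1 else bad
              let i1 := i + 1
              let bad2 := if swcBad ws we mh (i1 + dur - 1) then bad1 + 1 else bad1
              swcLoopB ws we mh dur hi fuel i1 bad2
      else some i

def schedule_weekly_course_alt (duration : Int) (weekly_effort : Int) (weekly_slots : List (List Int)) (max_hours_per_week : Int) (earliest_start : Int) : Option Int :=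
  let n : Int := (weekly_slots.length : Int)
  let hi := n - duration
  if earliest_start > hi then none
  else if duration ≤ 0 then some earliest_start
  else
    let bad := (PySem.List.pyRange 0 duration 1).foldl
      (fun b j => if swcBad weekly_slots weekly_effort max_hours_per_week (earliest_start + j) then b + 1 else b) (0 : Int)
    swcLoopB weekly_slots weekly_effort max_hours_per_week duration hi
      (hi - earliest_start).toNat earliest_start bad

-- ===== PRECONDITION & SPEC =====
-- Pre_ excludes exactly the inputs on which Python A raises IndexError: a nonempty positive-length
-- window whose first accessed index earliest_start is below -len(weekly_slots).
def Pre_schedule_weekly_course (duration : Int) (weekly_effort : Int) (weekly_slots : List (List Int)) (max_hours_per_week : Int) (earliest_start : Int) : Prop :=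
  ¬ (1 ≤ duration ∧ earliest_start < -(weekly_slots.length : Int) ∧ earliest_start ≤ (weekly_slots.length : Int) - duration)
instance (duration : Int) (weekly_effort : Int) (weekly_slots : List (List Int)) (max_hours_per_week : Int) (earliest_start : Int) : Decidable (Pre_schedule_weekly_course duration weekly_effort weekly_slots max_hours_per_week earliest_start) := by unfold Pre_schedule_weekly_course; infer_instance

def pvWitness_schedule_weekly_course : Int × Int × List (List Int) × Int × Int :=
  (2, 3, [[1, 2], [], [4]], 5, 0)

def Spec_schedule_weekly_course (duration : Int) (weekly_effort : Int) (weekly_slots : List (List Int)) (max_hours_per_week : Int) (earliest_start : Int) (out : Option Int) : Prop := out = schedule_weekly_course_alt duration weekly_effort weekly_slots max_hours_per_week earliest_start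
instance (duration : Int) (weekly_effort : Int) (weekly_slots : List (List Int)) (max_hours_per_week : Int) (earliest_start : Int) (out : Option Int) : Decidable (Spec_schedule_weekly_course duration weekly_effort weekly_slots max_hours_per_week earliest_start out) := by unfold Spec_schedule_weekly_course; infer_instance

-- ===== CLAIM (what is proved, stated in full; the proofs are below) =====
def Claim_equal_schedule_weekly_course : Prop := ∀ (duration : Int) (weekly_effort : Int) (weekly_slots : List (List Int)) (max_hours_per_week : Int) (earliest_start : Int), Dom_schedule_weekly_course duration weekly_effort weekly_slots max_hours_per_week earliest_start → Pre_schedule_weekly_course duration weekly_effort weekly_slots max_hours_per_week earliest_start → Spec_schedule_weekly_course duration weekly_effort weekly_slots max_hours_per_week earliest_start (schedule_weekly_course duration weekly_effort weekly_slots max_hours_per_week earliest_start)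



-- ===== LEMMAS AND PROOFS =====

-- the inner 'fits' fold is the conjunction of the per-week tests
theorem swcFits_eq_all (ws : List (List Int)) (we mh i : Int) (js : List Int) :
    swcFits ws we mh i js = js.all (fun j => !swcBad ws we mh (i + j)) := by
  have gen : ∀ (js : List Int) (acc : Bool),
      js.foldl (fun fits j => if swcLen ws (i + j) + we > mh then false else fits) acc
        = (acc && js.all (fun j => !swcBad ws we mh (i + j))) := by
    intro js
    induction js with
    | nil => intro acc; simp
    | cons j t ih =>
        intro acc
        simp only [List.foldl_cons, List.all_cons, ih, swcBad]
        by_cases h : swcLen ws (i + j) + we > mh <;> simp [h]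
  unfold swcFits
  rw [gen, Bool.true_and]

-- the number of non-fitting weeks in the window starting at i
def swcCnt (ws : List (List Int)) (we mh dur i : Int) : Nat :=
  (PySem.List.pyRange i (i + dur) 1).countP (fun k => swcBad ws we mh k)

theorem swcCnt_eq_offsets (ws : List (List Int)) (we mh dur i : Int) :
    swcCnt ws we mh dur i
      = (PySem.List.pyRange 0 dur 1).countP (fun j => swcBad ws we mh (i + j)) := by
  unfold swcCnt
  rw [PySem.List.pyRange_one, PySem.List.pyRange_one, List.countP_map, List.countP_map]
  simp [Function.comp_def]

theorem swcFits_iff_cnt (ws : List (List Int)) (we mh dur i : Int) :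
    swcFits ws we mh i (PySem.List.pyRange 0 dur 1) = true ↔ swcCnt ws we mh dur i = 0 := by
  rw [swcFits_eq_all, swcCnt_eq_offsets, List.countP_eq_zero, List.all_eq_true]
  simp

-- the initializing fold computes the window count at earliest_start
theorem swcInit_eq_cnt (ws : List (List Int)) (we mh dur es : Int) :
    (PySem.List.pyRange 0 dur 1).foldl
        (fun b j => if swcBad ws we mh (es + j) then b + 1 else b) (0 : Int)
      = (swcCnt ws we mh dur es : Int) := by
  have gen : ∀ (js : List Int) (b : Int),
      js.foldl (fun b j => if swcBad ws we mh (es + j) then b + 1 else b) b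
        = b + (js.countP (fun j => swcBad ws we mh (es + j)) : Int) := by
    intro js
    induction js with
    | nil => intro b; simp
    | cons j t ih =>
        intro b
        by_cases h : swcBad ws we mh (es + j)
        · simp [h, ih]; ring
        · simp [h, ih]
  rw [gen, swcCnt_eq_offsets]
  simp

-- sliding the window one step to the right
theorem swcCnt_slide (ws : List (List Int)) (we mh dur i : Int) (hdur : 1 ≤ dur) :
    (swcCnt ws we mh dur (i + 1) : Int)
      = (swcCnt ws we mh dur i : Int)
        - (if swcBad ws we mh i then 1 else 0)
        + (if swcBad ws we mh (i + dur) then 1 else 0) := by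
  unfold swcCnt
  have h1 : PySem.List.pyRange i (i + dur) 1 = i :: PySem.List.pyRange (i + 1) (i + dur) 1 :=
    PySem.List.pyRange_one_cons (by omega)
  have h2 : PySem.List.pyRange (i + 1) (i + 1 + dur) 1
      = PySem.List.pyRange (i + 1) (i + dur) 1 ++ [i + dur] := by
    have h3 : i + 1 + dur = (i + dur) + 1 := by ring
    rw [h3, PySem.List.pyRange_one_succ_right (by omega)]
  rw [h1, h2, List.countP_cons, List.countP_append]
  by_cases hb : swcBad ws we mh i <;> by_cases hb' : swcBad ws we mh (i + dur) <;>
    simp [hb, hb']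

-- the while loop agrees with A's linear search, given the window-count invariant
theorem swcLoopB_eq_loopA (ws : List (List Int)) (we mh dur hi : Int) (hdur : 1 ≤ dur) :
    ∀ (fuel : Nat) (i : Int), i ≤ hi → fuel = (hi - i).toNat →
      swcLoopB ws we mh dur hi fuel i (swcCnt ws we mh dur i : Int)
        = swcLoopA ws we mh dur (hi + 1) i := by
  intro fuel
  induction fuel with
  | zero =>
      intro i hile hf
      have hieq : i = hi := by omega
      subst hieq
      rw [swcLoopA, dif_pos (by omega)]
      by_cases hc : swcCnt ws we mh dur i = 0
      · have hfits := (swcFits_iff_cnt ws we mh dur i).mpr hc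
        simp [swcLoopB, hc, hfits]
      · have hfits : ¬ swcFits ws we mh i (PySem.List.pyRange 0 dur 1) = true := by
          rw [swcFits_iff_cnt]; exact hc
        simp only [swcLoopB]
        rw [if_pos (by exact_mod_cast Nat.pos_of_ne_zero hc), if_pos (by simp), if_neg hfits,
          swcLoopA, dif_neg (by omega)]
  | succ f ih =>
      intro i hile hf
      have hilt : i < hi := by omega
      rw [swcLoopA, dif_pos (by omega)]
      by_cases hc : swcCnt ws we mh dur i = 0
      · have hfits := (swcFits_iff_cnt ws we mh dur i).mpr hc
        simp [swcLoopB, hc, hfits]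
      · have hfits : ¬ swcFits ws we mh i (PySem.List.pyRange 0 dur 1) = true := by
          rw [swcFits_iff_cnt]; exact hc
        simp only [swcLoopB]
        rw [if_pos (by exact_mod_cast Nat.pos_of_ne_zero hc), if_neg (by simp; omega),
          if_neg hfits]
        have hbad2 :
            (if swcBad ws we mh (i + 1 + dur - 1) then
                (if swcBad ws we mh i then (swcCnt ws we mh dur i : Int) - 1
                 else (swcCnt ws we mh dur i : Int)) + 1
              else (if swcBad ws we mh i then (swcCnt ws we mh dur i : Int) - 1
                 else (swcCnt ws we mh dur i : Int)))
              = (swcCnt ws we mh dur (i + 1) : Int) := by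
          have heq : i + 1 + dur - 1 = i + dur := by ring
          rw [heq, swcCnt_slide ws we mh dur i hdur]
          by_cases hb : swcBad ws we mh i <;> by_cases hb' : swcBad ws we mh (i + dur) <;>
            simp [hb, hb']
        rw [hbad2, ih (i + 1) (by omega) (by omega)]

theorem swc_equal : ∀ (duration : Int) (weekly_effort : Int) (weekly_slots : List (List Int)) (max_hours_per_week : Int) (earliest_start : Int), schedule_weekly_course duration weekly_effort weekly_slots max_hours_per_week earliest_start = schedule_weekly_course_alt duration weekly_effort weekly_slots max_hours_per_week earliest_start := by
  intro dur we ws mh es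
  unfold schedule_weekly_course schedule_weekly_course_alt
  simp only []
  set n : Int := (ws.length : Int) with hn
  by_cases hes : es > n - dur
  · rw [if_pos hes, swcLoopA, dif_neg (by omega)]
  · rw [if_neg hes]
    by_cases hd : dur ≤ 0
    · rw [if_pos hd, swcLoopA, dif_pos (by omega)]
      have hfits : swcFits ws we mh es (PySem.List.pyRange 0 dur 1) = true := by
        rw [PySem.List.pyRange_one_eq_nil (by omega)]; rfl
      simp [hfits]
    · have hstop : n - dur + 1 = (n - dur) + 1 := by ring
      rw [if_neg hd, swcInit_eq_cnt, hstop,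
        swcLoopB_eq_loopA ws we mh dur (n - dur) (by omega) _ es (by omega) rfl]

-- ===== VERDICT (by name: the statement is the Claim_ definition above) =====
theorem schedule_weekly_course_spec : Claim_equal_schedule_weekly_course := by
  intro d we ws mh es _ _
  exact swc_equal d we ws mh es
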